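-- pv_equiv track=rewrite | github.com/ADIOCLASSMATE/Bag-of-tricks-for-Transformers | exp/engram-core/train_gpt.py | build_engram_head_vocab_sizes
-- ===== SOURCE A (Python) =====
-- import math
--
-- def is_prime(n: int) -> bool:
--     if n < 2:
--         return False
--     if n % 2 == 0:
--         return n == 2
--     limit = int(math.isqrt(n))
--     for candidate in range(3, limit + 1, 2):
--         if n % candidate == 0:
--             return False
--     return True
--
-- def find_next_prime(start: int, seen_primes: set[int]) -> int:
--     candidate = max(2, start + 1)
--     if candidate > 2 and candidate % 2 == 0:
--         candidate += 1
--     while True: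
--         if is_prime(candidate) and candidate not in seen_primes:
--             return candidate
--         candidate += 1 if candidate == 2 else 2
--
-- def build_engram_head_vocab_sizes(
--     vocab_sizes: tuple[int, ...],
--     layer_ids: tuple[int, ...],
--     heads_per_ngram: int,
-- ) -> dict[int, list[int]]:
--     seen_primes: set[int] = set()
--     head_sizes_by_layer: dict[int, list[int]] = {}
--     for layer_id in layer_ids:
--         layer_head_sizes: list[int] = []
--         for base_vocab in vocab_sizes:
--             search_start = base_vocab - 1
--             for _head in range(heads_per_ngram):
--                 prime = find_next_prime(search_start, seen_primes)
--                 seen_primes.add(prime)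
--                 layer_head_sizes.append(prime)
--                 search_start = prime
--         head_sizes_by_layer[layer_id] = layer_head_sizes
--     return head_sizes_by_layer
-- ===== SOURCE B (Python) =====
-- # B: segmented sieve instead of per-candidate trial division: next primes are
-- # found by marking multiples of cached base primes in a 64-wide window and
-- # scanning for an unmarked, unused number (objective: alternative algorithm).
--
-- def _composites_below(n):
--     comp = set()
--     d = 2
--     while d * d < n:
--         for m in range(d * d, n, d):
--             comp.add(m)
--         d += 1
--     return comp
--
--
-- def build_engram_head_vocab_sizes(vocab_sizes, layer_ids, heads_per_ngram):
--     plim = 2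
--     primes = []  # all primes < plim, recomputed when plim grows
--
--     seen = set()
--
--     def next_unseen_prime(s):
--         nonlocal plim, primes
--         lo = max(2, s + 1)
--         while True:
--             hi = lo + 64
--             if plim * plim < hi:
--                 while plim * plim < hi:
--                     plim *= 2
--                 comp = _composites_below(plim)
--                 primes = [p for p in range(2, plim) if p not in comp]
--             marked = set()
--             for p in primes:
--                 if p * p < hi:
--                     first = max(p * p, ((lo + p - 1) // p) * p)
--                     for m in range(first, hi, p):
--                         marked.add(m)
--             for n in range(lo, hi):
--                 if n not in marked and n not in seen:
--                     return n
--             lo = hi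
--
--     out = {}
--     for lid in layer_ids:
--         sizes = []
--         for base in vocab_sizes:
--             s = base - 1
--             for _ in range(heads_per_ngram):
--                 s = next_unseen_prime(s)
--                 seen.add(s)
--                 sizes.append(s)
--         out[lid] = sizes
--     return out
-- ===== Notes on version B (the rewrite author's own statement) =====
-- stated objective: alternative
-- what changed: B replaces A's per-candidate trial division (divide each candidate by every odd number up to its square root) with a segmented sieve of Eratosthenes: it keeps a cached, lazily doubled table of base primes, marks their multiples inside a 64-wide window, and scans the window for the first unmarked number not yet used.
import Mathlib
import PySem

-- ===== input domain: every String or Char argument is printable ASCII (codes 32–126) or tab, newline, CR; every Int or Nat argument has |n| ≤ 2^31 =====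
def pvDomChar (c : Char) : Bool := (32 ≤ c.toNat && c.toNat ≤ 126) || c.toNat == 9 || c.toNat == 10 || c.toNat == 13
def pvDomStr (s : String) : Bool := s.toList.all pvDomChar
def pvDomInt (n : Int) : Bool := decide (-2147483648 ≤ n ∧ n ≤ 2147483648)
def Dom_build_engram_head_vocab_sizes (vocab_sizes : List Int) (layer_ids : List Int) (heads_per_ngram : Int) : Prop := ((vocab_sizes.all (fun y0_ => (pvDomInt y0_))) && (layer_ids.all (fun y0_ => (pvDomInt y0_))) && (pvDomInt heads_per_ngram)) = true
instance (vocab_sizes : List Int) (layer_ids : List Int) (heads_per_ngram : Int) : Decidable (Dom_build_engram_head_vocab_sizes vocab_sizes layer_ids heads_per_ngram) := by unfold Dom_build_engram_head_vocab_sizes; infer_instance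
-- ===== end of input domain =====

-- B replaces A's per-candidate trial division with a segmented sieve (cached base
-- primes, multiples marked in 64-wide windows) — objective: alternative algorithm.
-- Both Python `while True` search loops terminate because there are infinitely many
-- primes; both Lean ports carry the SAME numeric totality budget `pvSearchFuel`
-- (a guard only, it changes neither algorithm) and return 0 when it is exhausted
-- (unreachable in Python).
def pvSearchFuel (seen : PySem.Set Int) : Nat := 2 ^ (seen.length + 42)

-- ===== PORT A =====
def is_prime (n : Int) : Bool :=
  if n < 2 then false
  else if PySem.Int.mod n 2 == 0 then n == 2
  else
    let limit : Int := (Nat.sqrt n.toNat : Int)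
    -- for candidate in range(3, limit+1, 2): if n % candidate == 0: return False
    (PySem.List.pyRange 3 (limit + 1) 2).all (fun c => !(PySem.Int.mod n c == 0))

def find_next_prime_loop (candidate top : Int) (seen : PySem.Set Int) : Int :=
  if _h : candidate ≥ top then 0  -- totality guard; unreachable in Python (primes are infinite)
  else if is_prime candidate && !(PySem.Set.contains seen candidate) then candidate
  else find_next_prime_loop (candidate + (if candidate == 2 then 1 else 2)) top seen
termination_by (top - candidate).toNat
decreasing_by
  split <;> omega

def find_next_prime (start : Int) (seen : PySem.Set Int) : Int :=
  let c0 := max 2 (start + 1)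
  let c1 := if c0 > 2 && PySem.Int.mod c0 2 == 0 then c0 + 1 else c0
  find_next_prime_loop c1 (c0 + 64 * (pvSearchFuel seen : Int)) seen

def build_engram_head_vocab_sizes (vocab_sizes : List Int) (layer_ids : List Int) (heads_per_ngram : Int) : List (Int × List Int) :=
  let res := layer_ids.foldl
    (fun (st : PySem.Set Int × PySem.Dict Int (List Int)) layer_id =>
      let inner := vocab_sizes.foldl
        (fun (st2 : PySem.Set Int × List Int) base_vocab =>
          let r := (PySem.List.pyRange 0 heads_per_ngram 1).foldl
            (fun (st3 : PySem.Set Int × List Int × Int) _ =>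
              let prime := find_next_prime st3.2.2 st3.1
              (PySem.Set.add st3.1 prime, st3.2.1 ++ [prime], prime))
            (st2.1, st2.2, base_vocab - 1)
          (r.1, r.2.1))
        (st.1, ([] : List Int))
      (inner.1, st.2.insert layer_id inner.2))
    (([] : PySem.Set Int), (PySem.Dict.empty : PySem.Dict Int (List Int)))
  res.2.items

-- ===== PORT B =====
-- while d*d < n: for m in range(d*d, n, d): comp.add(m); d += 1
def comp_mark_loop (d n : Int) (s : PySem.Set Int) : PySem.Set Int :=
  if h : d * d < n then
    comp_mark_loop (d + 1) n ((PySem.List.pyRange (d * d) n d).foldl PySem.Set.add s)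
  else s
termination_by (n - d).toNat
decreasing_by
  have hdn : d < n := by nlinarith [sq_nonneg d, sq_nonneg (d - 1)]
  omega

def composites_below (n : Int) : PySem.Set Int := comp_mark_loop 2 n PySem.Set.empty

-- primes = [p for p in range(2, plim) if p not in _composites_below(plim)]
def primes_below (plim : Int) : List Int :=
  let comp := composites_below plim
  (PySem.List.pyRange 2 plim 1).filter (fun p => !(PySem.Set.contains comp p))

-- while plim * plim < hi: plim *= 2   (the 0 < plim conjunct is a totality guard
-- only: the ported state always has plim ≥ 2)
def grow_plim (plim hi : Int) : Int :=
  if h : 0 < plim ∧ plim * plim < hi then grow_plim (2 * plim) hi else plim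
termination_by (hi - plim).toNat
decreasing_by
  have hdn : plim < hi := by nlinarith [sq_nonneg (plim - 1)]
  omega

-- if plim * plim < hi: (while …); comp = …; primes = […]
def ensure_primes (st : Int × List Int) (hi : Int) : Int × List Int :=
  if st.1 * st.1 < hi then
    let plim' := grow_plim st.1 hi
    (plim', primes_below plim')
  else st

-- for p in primes: if p*p < hi: for m in range(max(p*p, ((lo+p-1)//p)*p), hi, p): marked.add(m)
def mark_window (primes : List Int) (lo hi : Int) : PySem.Set Int :=
  primes.foldl
    (fun s p =>
      if p * p < hi then
        (PySem.List.pyRange (max (p * p) (PySem.Int.floordiv (lo + p - 1) p * p)) hi p).foldl PySem.Set.add s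
      else s)
    PySem.Set.empty

-- the `while True` window loop of _next_unseen_prime_, with the shared fuel guard
def window_search (fuel : Nat) (lo : Int) (st : Int × List Int) (seen : PySem.Set Int) : Int × (Int × List Int) :=
  match fuel with
  | 0 => (0, st)  -- unreachable in Python (primes are infinite)
  | Nat.succ f =>
    let hi := lo + 64
    let st' := ensure_primes st hi
    let marked := mark_window st'.2 lo hi
    -- for n in range(lo, hi): if n not in marked and n not in seen: return n
    match (PySem.List.pyRange lo hi 1).find?
        (fun n => !(PySem.Set.contains marked n) && !(PySem.Set.contains seen n)) with
    | some n => (n, st')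
    | none => window_search f hi st' seen

-- next_unseen_prime mutates the closed-over plim/primes state; ported state-passing.
def next_unseen_prime (s : Int) (st : Int × List Int) (seen : PySem.Set Int) : Int × (Int × List Int) :=
  window_search (pvSearchFuel seen) (max 2 (s + 1)) st seen

def build_engram_head_vocab_sizes_alt (vocab_sizes : List Int) (layer_ids : List Int) (heads_per_ngram : Int) : List (Int × List Int) :=
  let res := layer_ids.foldl
    (fun (acc : (Int × List Int) × PySem.Set Int × PySem.Dict Int (List Int)) lid =>
      let r := vocab_sizes.foldl
        (fun (acc2 : (Int × List Int) × PySem.Set Int × List Int) base =>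
          let r3 := (PySem.List.pyRange 0 heads_per_ngram 1).foldl
            (fun (q : ((Int × List Int) × PySem.Set Int × List Int) × Int) _ =>
              let pr := next_unseen_prime q.2 q.1.1 q.1.2.1
              ((pr.2, PySem.Set.add q.1.2.1 pr.1, q.1.2.2 ++ [pr.1]), pr.1))
            (acc2, base - 1)
          r3.1)
        (acc.1, acc.2.1, ([] : List Int))
      (r.1, r.2.1, acc.2.2.insert lid r.2.2))
    (((2 : Int), ([] : List Int)), ([] : PySem.Set Int), (PySem.Dict.empty : PySem.Dict Int (List Int)))
  res.2.2.items

-- ===== PRECONDITION & SPEC =====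
def Spec_build_engram_head_vocab_sizes (vocab_sizes : List Int) (layer_ids : List Int) (heads_per_ngram : Int) (out : List (Int × List Int)) : Prop := out = build_engram_head_vocab_sizes_alt vocab_sizes layer_ids heads_per_ngram
instance (vocab_sizes : List Int) (layer_ids : List Int) (heads_per_ngram : Int) (out : List (Int × List Int)) : Decidable (Spec_build_engram_head_vocab_sizes vocab_sizes layer_ids heads_per_ngram out) := by unfold Spec_build_engram_head_vocab_sizes; infer_instance

-- ===== CLAIM (what is proved, stated in full; the proofs are below) =====
def Claim_equal_build_engram_head_vocab_sizes : Prop := ∀ (vocab_sizes : List Int) (layer_ids : List Int) (heads_per_ngram : Int), Dom_build_engram_head_vocab_sizes vocab_sizes layer_ids heads_per_ngram → Spec_build_engram_head_vocab_sizes vocab_sizes layer_ids heads_per_ngram (build_engram_head_vocab_sizes vocab_sizes layer_ids heads_per_ngram)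

-- ===== LEMMAS AND PROOFS =====

-- reference scanner: first n in [c, top) that is prime and unseen, else 0
def unitScan (c top : Int) (seen : PySem.Set Int) : Int :=
  if h : c ≥ top then 0
  else if is_prime c && !(PySem.Set.contains seen c) then c
  else unitScan (c + 1) top seen
termination_by (top - c).toNat
decreasing_by omega

-- the invariant carried by B's (plim, primes) state
def StInv (st : Int × List Int) : Prop := 2 ≤ st.1 ∧ st.2 = primes_below st.1

theorem not_prime_of_divisor (m k : Nat) (h2 : 2 ≤ k) (hlt : k < m) (hd : k ∣ m) : ¬ m.Prime := by
  intro hp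
  rcases hp.eq_one_or_self_of_dvd k hd with h | h <;> omega

theorem is_prime_iff (n : Int) : is_prime n = true ↔ 2 ≤ n ∧ Nat.Prime n.toNat := by
  unfold is_prime
  split_ifs with h1 h2
  · simp only [false_iff, not_and]
    omega
  · rw [beq_iff_eq, PySem.Int.mod_eq_zero_iff_dvd] at h2
    simp only [beq_iff_eq]
    constructor
    · rintro rfl
      exact ⟨by norm_num, by decide⟩
    · rintro ⟨hn2, hp⟩
      have hm2 : (2 : Nat) ∣ n.toNat := by
        rcases h2 with ⟨k, hk⟩
        exact ⟨k.toNat, by omega⟩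
      have := (Nat.Prime.even_iff hp).mp (even_iff_two_dvd.mpr hm2)
      omega
  · rw [beq_iff_eq, PySem.Int.mod_eq_zero_iff_dvd] at h2
    have hn3 : 3 ≤ n := by
      rcases Int.even_or_odd n with ⟨k, hk⟩ | ⟨k, hk⟩
      · exact absurd ⟨k, by omega⟩ h2
      · omega
    set m := n.toNat with hm
    have hmn : (m : Int) = n := Int.toNat_of_nonneg (by omega)
    simp only [List.all_eq_true, Bool.not_eq_eq_eq_not, Bool.not_true, beq_eq_false_iff_ne, ne_eq]
    constructor
    · intro H
      refine ⟨by omega, ?_⟩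
      by_contra hnp
      set q := m.minFac with hq
      have hqp : q.Prime := Nat.minFac_prime (by omega)
      have hqsq : q ^ 2 ≤ m := Nat.minFac_sq_le_self (by omega) hnp
      have hqd : q ∣ m := Nat.minFac_dvd m
      have hqdn : (q : Int) ∣ n := by
        rw [← hmn]
        exact_mod_cast hqd
      have hq2 : q ≠ 2 := by
        rintro h
        rw [h] at hqdn
        exact h2 hqdn
      have hqodd : q % 2 = 1 := (Nat.Prime.eq_two_or_odd hqp).resolve_left hq2
      have hq3 : 3 ≤ q := by
        have := hqp.two_le
        omega
      have hmem : (q : Int) ∈ PySem.List.pyRange 3 ((Nat.sqrt m : Int) + 1) 2 := by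
        rw [PySem.List.mem_pyRange_iff_of_pos (by omega)]
        have hle : q ≤ Nat.sqrt m := Nat.le_sqrt'.mpr (by nlinarith)
        refine ⟨by omega, by omega, ?_⟩
        omega
      have := H _ hmem
      apply this
      rw [PySem.Int.mod_eq_zero_iff_dvd]
      exact hqdn
    · rintro ⟨-, hp⟩ c hc
      rw [PySem.List.mem_pyRange_iff_of_pos (by omega)] at hc
      obtain ⟨hc3, hcu, -⟩ := hc
      rw [PySem.Int.mod_eq_zero_iff_dvd]
      intro hdvd
      have hcd : c.toNat ∣ m := by
        have : (c.toNat : Int) ∣ (m : Int) := by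
          rw [Int.toNat_of_nonneg (by omega), hmn]
          exact hdvd
        exact_mod_cast this
      have hsl : Nat.sqrt m < m := Nat.sqrt_lt_self (by omega)
      have : c.toNat ≤ Nat.sqrt m := by omega
      rcases hp.eq_one_or_self_of_dvd c.toNat hcd with h | h <;> omega

theorem mem_comp_mark_loop (x : Int) : ∀ (k : Nat) (d n : Int) (s : PySem.Set Int), 2 ≤ d → (n - d).toNat ≤ k →
    (x ∈ comp_mark_loop d n s ↔ x ∈ s ∨ ∃ e, d ≤ e ∧ e * e < n ∧ x ∈ PySem.List.pyRange (e * e) n e) := by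
  intro k
  induction k with
  | zero =>
    intro d n s hd2 hk
    have hng : ¬ d * d < n := by
      intro h
      have : d < n := by nlinarith [sq_nonneg (d - 1)]
      omega
    rw [comp_mark_loop, dif_neg hng]
    constructor
    · exact Or.inl
    · rintro (h | ⟨e, hde, hen, -⟩)
      · exact h
      · exfalso
        have hsq : d * d ≤ e * e := mul_le_mul hde hde (by omega) (by omega)
        omega
  | succ k ih =>
    intro d n s hd2 hk
    rw [comp_mark_loop]
    by_cases h : d * d < n
    · rw [dif_pos h]
      have hdn : d < n := by nlinarith [sq_nonneg (d - 1)]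
      rw [ih (d + 1) n _ (by omega) (by omega)]
      have hmem : x ∈ (PySem.List.pyRange (d * d) n d).foldl PySem.Set.add s ↔
          x ∈ s ∨ x ∈ PySem.List.pyRange (d * d) n d := by
        have := PySem.Set.mem_foldl_add (PySem.List.pyRange (d * d) n d) (fun b => b) s x
        simpa using this
      rw [hmem]
      constructor
      · rintro ((hs | hr) | ⟨e, he, hen, hx⟩)
        · exact Or.inl hs
        · exact Or.inr ⟨d, le_rfl, h, hr⟩
        · exact Or.inr ⟨e, by omega, hen, hx⟩
      · rintro (hs | ⟨e, he, hen, hx⟩)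
        · exact Or.inl (Or.inl hs)
        · rcases eq_or_lt_of_le he with rfl | hlt
          · exact Or.inl (Or.inr hx)
          · exact Or.inr ⟨e, by omega, hen, hx⟩
    · rw [dif_neg h]
      constructor
      · exact Or.inl
      · rintro (hs | ⟨e, he, hen, hx⟩)
        · exact hs
        · exfalso
          have hsq : d * d ≤ e * e := mul_le_mul he he (by omega) (by omega)
          omega

theorem mem_composites_below (x n : Int) :
    x ∈ composites_below n ↔ ∃ e, 2 ≤ e ∧ e * e < n ∧ e ∣ x ∧ e * e ≤ x ∧ x < n := by
  rw [composites_below, mem_comp_mark_loop x (n - 2).toNat 2 n _ le_rfl le_rfl]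
  simp only [PySem.Set.empty]
  constructor
  · rintro (h | ⟨e, he, hen, hx⟩)
    · simp at h
    · rw [PySem.List.mem_pyRange_iff_of_pos (by omega)] at hx
      obtain ⟨h1, h2, h3⟩ := hx
      refine ⟨e, he, hen, ?_, h1, h2⟩
      have hx : e ∣ (x - e * e) + e * e := dvd_add h3 (dvd_mul_left e e)
      simpa using hx
  · rintro ⟨e, he, hen, hdvd, hle, hlt⟩
    refine Or.inr ⟨e, he, hen, ?_⟩
    rw [PySem.List.mem_pyRange_iff_of_pos (by omega)]
    exact ⟨hle, hlt, dvd_sub hdvd (dvd_mul_left e e)⟩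

theorem not_mem_composites_iff_prime (x n : Int) (h2 : 2 ≤ x) (hn : x < n) :
    (x ∉ composites_below n) ↔ Nat.Prime x.toNat := by
  rw [mem_composites_below]
  have hmx : (x.toNat : Int) = x := Int.toNat_of_nonneg (by omega)
  constructor
  · intro H
    by_contra hnp
    apply H
    set q := x.toNat.minFac with hq
    have hqp : q.Prime := Nat.minFac_prime (by omega)
    have hqsq : q ^ 2 ≤ x.toNat := Nat.minFac_sq_le_self (by omega) hnp
    have hqd : q ∣ x.toNat := Nat.minFac_dvd _
    have hqdn : (q : Int) ∣ x := by rw [← hmx]; exact_mod_cast hqd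
    have hq2 : 2 ≤ q := hqp.two_le
    have hsq : (q : Int) * q ≤ x := by
      rw [← hmx]
      exact_mod_cast (by nlinarith : q * q ≤ x.toNat)
    exact ⟨(q : Int), by exact_mod_cast hq2, by omega, hqdn, hsq, hn⟩
  · rintro hp ⟨e, he2, hen, hdvd, hle, -⟩
    have heltx : e < x := by nlinarith
    have hed : e.toNat ∣ x.toNat := by
      have : (e.toNat : Int) ∣ (x.toNat : Int) := by
        rw [Int.toNat_of_nonneg (by omega), hmx]
        exact hdvd
      exact_mod_cast this
    exact not_prime_of_divisor x.toNat e.toNat (by omega) (by omega) hed hp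

theorem mem_primes_below (p plim : Int) :
    p ∈ primes_below plim ↔ 2 ≤ p ∧ p < plim ∧ Nat.Prime p.toNat := by
  rw [primes_below]
  simp only [List.mem_filter, PySem.List.mem_pyRange_one, Bool.not_eq_eq_eq_not, Bool.not_true,
    ← Bool.not_eq_true, PySem.Set.contains_iff]
  constructor
  · rintro ⟨⟨h2, hlt⟩, hnc⟩
    exact ⟨h2, hlt, (not_mem_composites_iff_prime p plim h2 hlt).mp hnc⟩
  · rintro ⟨h2, hlt, hp⟩
    exact ⟨⟨h2, hlt⟩, (not_mem_composites_iff_prime p plim h2 hlt).mpr hp⟩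

theorem grow_plim_spec (plim hi : Int) (h2 : 2 ≤ plim) :
    2 ≤ grow_plim plim hi ∧ ¬ (grow_plim plim hi * grow_plim plim hi < hi) := by
  have main : ∀ (k : Nat) (q : Int), (hi - q).toNat ≤ k → 2 ≤ q →
      2 ≤ grow_plim q hi ∧ ¬ (grow_plim q hi * grow_plim q hi < hi) := by
    intro k
    induction k with
    | zero =>
      intro q hk hq
      have hng : ¬ (0 < q ∧ q * q < hi) := by
        rintro ⟨-, hlt⟩
        have : q < hi := by nlinarith [sq_nonneg (q - 1)]
        omega
      rw [grow_plim, dif_neg hng]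
      refine ⟨hq, fun hc => hng ⟨by omega, hc⟩⟩
    | succ k ih =>
      intro q hk hq
      rw [grow_plim]
      by_cases h : 0 < q ∧ q * q < hi
      · rw [dif_pos h]
        have : q < hi := by nlinarith [sq_nonneg (q - 1)]
        exact ih (2 * q) (by omega) (by omega)
      · rw [dif_neg h]
        exact ⟨hq, fun hc => h ⟨by omega, hc⟩⟩
  exact main (hi - plim).toNat plim le_rfl h2

theorem ensure_primes_spec (st : Int × List Int) (hi : Int) (hInv : StInv st) :
    StInv (ensure_primes st hi) ∧ ¬ ((ensure_primes st hi).1 * (ensure_primes st hi).1 < hi) := by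
  have h2 := hInv.1
  rw [ensure_primes]
  by_cases h : st.1 * st.1 < hi
  · rw [if_pos h]
    obtain ⟨hg2, hgsq⟩ := grow_plim_spec st.1 hi h2
    exact ⟨⟨hg2, rfl⟩, hgsq⟩
  · rw [if_neg h]
    exact ⟨hInv, h⟩

theorem mem_mark_window (x : Int) (primes : List Int) (lo hi : Int) :
    x ∈ mark_window primes lo hi ↔
      ∃ p ∈ primes, p * p < hi ∧
        x ∈ PySem.List.pyRange (max (p * p) (PySem.Int.floordiv (lo + p - 1) p * p)) hi p := by
  rw [mark_window]
  have main : ∀ (L : List Int) (s : PySem.Set Int),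
      x ∈ L.foldl
        (fun s p =>
          if p * p < hi then
            (PySem.List.pyRange (max (p * p) (PySem.Int.floordiv (lo + p - 1) p * p)) hi p).foldl PySem.Set.add s
          else s) s
      ↔ x ∈ s ∨ ∃ p ∈ L, p * p < hi ∧
          x ∈ PySem.List.pyRange (max (p * p) (PySem.Int.floordiv (lo + p - 1) p * p)) hi p := by
    intro L
    induction L with
    | nil => simp
    | cons a L ih =>
      intro s
      simp only [List.foldl_cons, ih, List.mem_cons]
      by_cases h : a * a < hi
      · rw [if_pos h]
        have hmem := PySem.Set.mem_foldl_add
          (PySem.List.pyRange (max (a * a) (PySem.Int.floordiv (lo + a - 1) a * a)) hi a) (fun b => b) s x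
        simp only at hmem
        rw [hmem]
        constructor
        · rintro ((hs | ⟨b, hb, rfl⟩) | ⟨p, hp, hph, hx⟩)
          · exact Or.inl hs
          · exact Or.inr ⟨a, Or.inl rfl, h, hb⟩
          · exact Or.inr ⟨p, Or.inr hp, hph, hx⟩
        · rintro (hs | ⟨p, (rfl | hp), hph, hx⟩)
          · exact Or.inl (Or.inl hs)
          · exact Or.inl (Or.inr ⟨x, hx, rfl⟩)
          · exact Or.inr ⟨p, hp, hph, hx⟩
      · rw [if_neg h]
        constructor
        · rintro (hs | ⟨p, hp, hph, hx⟩)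
          · exact Or.inl hs
          · exact Or.inr ⟨p, Or.inr hp, hph, hx⟩
        · rintro (hs | ⟨p, (rfl | hp), hph, hx⟩)
          · exact Or.inl hs
          · exact absurd hph h
          · exact Or.inr ⟨p, hp, hph, hx⟩
  rw [main]
  simp [PySem.Set.empty]

theorem is_prime_even_false (c : Int) (h2 : 2 < c) (he : c % 2 = 0) : is_prime c = false := by
  unfold is_prime
  rw [if_neg (by omega), if_pos]
  · simp; omega
  · rw [beq_iff_eq, PySem.Int.mod_eq_emod_of_pos (by omega)]
    exact he

theorem unitScan_even_step (c top : Int) (seen : PySem.Set Int) (h2 : 2 < c) (he : c % 2 = 0) :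
    unitScan c top seen = unitScan (c + 1) top seen := by
  rw [unitScan]
  by_cases hb : c ≥ top
  · rw [dif_pos hb, unitScan, dif_pos (by omega)]
  · rw [dif_neg hb, is_prime_even_false c h2 he]
    simp

theorem mark_window_char (plim lo hi n : Int) (h2 : 2 ≤ lo) (hplim : 2 ≤ plim) (hhi : hi = lo + 64)
    (hcover : ¬ (plim * plim < hi)) (hlo : lo ≤ n) (hn : n < hi) :
    (!(PySem.Set.contains (mark_window (primes_below plim) lo hi) n)) = is_prime n := by
  have hn2 : 2 ≤ n := by omega
  by_cases hp : is_prime n = true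
  · rw [hp]
    simp only [Bool.not_eq_true', ← Bool.not_eq_true, PySem.Set.contains_iff]
    intro hmem
    rw [mem_mark_window] at hmem
    obtain ⟨p, hpmem, hph, hx⟩ := hmem
    rw [mem_primes_below] at hpmem
    obtain ⟨hp2, hpl, hpprime⟩ := hpmem
    rw [PySem.List.mem_pyRange_iff_of_pos (by omega)] at hx
    obtain ⟨hfst, -, hdvd⟩ := hx
    have hdf : p ∣ max (p * p) (PySem.Int.floordiv (lo + p - 1) p * p) := by
      rcases max_choice (p * p) (PySem.Int.floordiv (lo + p - 1) p * p) with hm | hm <;>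
        rw [hm]
      · exact dvd_mul_left p p
      · exact dvd_mul_left p _
    have hpn : p ∣ n := by
      have := dvd_add hdvd hdf
      simpa using this
    have hple : p * p ≤ n := le_trans (le_max_left _ _) hfst
    have hlt : p < n := by nlinarith
    have hnd : p.toNat ∣ n.toNat := by
      have : (p.toNat : Int) ∣ (n.toNat : Int) := by
        rw [Int.toNat_of_nonneg (by omega), Int.toNat_of_nonneg (by omega)]
        exact hpn
      exact_mod_cast this
    exact not_prime_of_divisor n.toNat p.toNat (by omega) (by omega) hnd ((is_prime_iff n).mp hp).2
  · rw [Bool.not_eq_true] at hp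
    rw [hp]
    simp only [Bool.not_eq_false', PySem.Set.contains_iff]
    have hnp : ¬ Nat.Prime n.toNat := by
      intro hc
      rw [(is_prime_iff n).mpr ⟨hn2, hc⟩] at hp
      exact absurd hp (by simp)
    set q : Int := (n.toNat.minFac : Int) with hq
    have hqp : Nat.Prime n.toNat.minFac := Nat.minFac_prime (by omega)
    have hq2 : 2 ≤ q := by rw [hq]; exact_mod_cast hqp.two_le
    have hqsqn : q * q ≤ n := by
      have h1 : n.toNat.minFac ^ 2 ≤ n.toNat := Nat.minFac_sq_le_self (by omega) hnp
      have : (n.toNat.minFac : Int) ^ 2 ≤ (n.toNat : Int) := by exact_mod_cast h1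
      rw [Int.toNat_of_nonneg (by omega)] at this
      nlinarith
    have hqsq_hi : q * q < hi := by omega
    have hqlt : q < plim := by nlinarith
    have hqdvd : q ∣ n := by
      have h1 : (n.toNat.minFac : Int) ∣ (n.toNat : Int) := by exact_mod_cast Nat.minFac_dvd n.toNat
      rwa [Int.toNat_of_nonneg (by omega)] at h1
    rw [mem_mark_window]
    refine ⟨q, (mem_primes_below q plim).mpr ⟨hq2, hqlt, by simpa [hq] using hqp⟩, hqsq_hi, ?_⟩
    rw [PySem.List.mem_pyRange_iff_of_pos (by omega)]
    have hceil : PySem.Int.floordiv (lo + q - 1) q * q ≤ n := by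
      rw [PySem.Int.floordiv_eq_ediv_of_pos (by omega)]
      obtain ⟨m, hm⟩ := hqdvd
      have hmle : (lo + q - 1) / q ≤ m := by
        by_contra hcon
        have h1 : m + 1 ≤ (lo + q - 1) / q := by omega
        have h2 : (m + 1) * q ≤ lo + q - 1 := (Int.le_ediv_iff_mul_le (by omega)).mp h1
        nlinarith
      calc (lo + q - 1) / q * q ≤ m * q := by
            exact mul_le_mul_of_nonneg_right hmle (by omega)
        _ = n := by rw [hm]; ring
    constructor
    · exact max_le hqsqn hceil
    refine ⟨hn, ?_⟩
    have hdf : q ∣ max (q * q) (PySem.Int.floordiv (lo + q - 1) q * q) := by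
      rcases max_choice (q * q) (PySem.Int.floordiv (lo + q - 1) q * q) with hm | hm <;> rw [hm]
      · exact dvd_mul_left q q
      · exact dvd_mul_left q _
    exact dvd_sub hqdvd hdf

theorem unitScan_window (seen : PySem.Set Int) (pred : Int → Bool) (hi top : Int) :
    ∀ (lo : Int), lo ≤ hi → hi ≤ top →
    (∀ n, lo ≤ n → n < hi → pred n = (is_prime n && !(PySem.Set.contains seen n))) →
    unitScan lo top seen =
      (match (PySem.List.pyRange lo hi 1).find? pred with
       | some n => n
       | none => unitScan hi top seen) := by
  have main : ∀ (k : Nat) (lo : Int), (hi - lo).toNat ≤ k → lo ≤ hi → hi ≤ top →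
      (∀ n, lo ≤ n → n < hi → pred n = (is_prime n && !(PySem.Set.contains seen n))) →
      unitScan lo top seen =
        (match (PySem.List.pyRange lo hi 1).find? pred with
         | some n => n
         | none => unitScan hi top seen) := by
    intro k
    induction k with
    | zero =>
      intro lo hk hle htop hgood
      have hlo : lo = hi := by omega
      subst hlo
      rw [PySem.List.pyRange_one_eq_nil le_rfl]
      simp [List.find?]
    | succ k ih =>
      intro lo hk hle htop hgood
      rcases eq_or_lt_of_le hle with rfl | hlt
      · rw [PySem.List.pyRange_one_eq_nil le_rfl]
        simp [List.find?]
      · rw [PySem.List.pyRange_one_cons hlt]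
        by_cases hp : pred lo = true
        · rw [List.find?_cons_of_pos hp]
          rw [unitScan, dif_neg (by omega), if_pos]
          rw [← hgood lo le_rfl hlt]
          exact hp
        · rw [List.find?_cons_of_neg (by simpa using hp)]
          rw [unitScan, dif_neg (by omega), if_neg (by rw [← hgood lo le_rfl hlt]; simpa using hp)]
          exact ih (lo + 1) (by omega) (by omega) htop (fun n h1 h2 => hgood n (by omega) h2)
  intro lo hle htop hgood
  exact main (hi - lo).toNat lo le_rfl hle htop hgood

theorem scan_eq (top : Int) (seen : PySem.Set Int) :
    ∀ (c : Int), 2 ≤ c → (c = 2 ∨ c % 2 = 1) →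
    find_next_prime_loop c top seen = unitScan c top seen := by
  have main : ∀ (k : Nat) (c : Int), (top - c).toNat ≤ k → 2 ≤ c → (c = 2 ∨ c % 2 = 1) →
      find_next_prime_loop c top seen = unitScan c top seen := by
    intro k
    induction k with
    | zero =>
      intro c hk hc _
      rw [find_next_prime_loop, unitScan, dif_pos (by omega), dif_pos (by omega)]
    | succ k ih =>
      intro c hk hc ha
      rw [find_next_prime_loop, unitScan]
      by_cases hb : c ≥ top
      · rw [dif_pos hb, dif_pos hb]
      · rw [dif_neg hb, dif_neg hb]
        by_cases hq : (is_prime c && !(PySem.Set.contains seen c)) = true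
        · rw [if_pos hq, if_pos hq]
        · rw [if_neg hq, if_neg hq]
          rcases ha with rfl | hodd
          · rw [if_pos (by decide)]
            exact ih 3 (by omega) (by omega) (by omega)
          · rw [if_neg (by simp; omega)]
            rw [unitScan_even_step (c + 1) top seen (by omega) (by omega),
              show c + 1 + 1 = c + 2 by ring]
            exact ih (c + 2) (by omega) (by omega) (by omega)
  intro c hc ha
  exact main (top - c).toNat c le_rfl hc ha

theorem window_search_spec (seen : PySem.Set Int) :
    ∀ (f : Nat) (lo : Int) (st : Int × List Int), 2 ≤ lo → StInv st →
    (window_search f lo st seen).1 = unitScan lo (lo + 64 * (f : Int)) seen ∧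
      StInv (window_search f lo st seen).2 := by
  intro f
  induction f with
  | zero =>
    intro lo st hlo hInv
    refine ⟨?_, hInv⟩
    rw [window_search, unitScan, dif_pos (by omega)]
  | succ f ih =>
    intro lo st hlo hInv
    obtain ⟨hInv', hcover⟩ := ensure_primes_spec st (lo + 64) hInv
    have hplim2 : 2 ≤ (ensure_primes st (lo + 64)).1 := hInv'.1
    have hprimes : (ensure_primes st (lo + 64)).2 = primes_below (ensure_primes st (lo + 64)).1 := hInv'.2
    have hgood : ∀ n, lo ≤ n → n < lo + 64 →
        (!(PySem.Set.contains (mark_window (ensure_primes st (lo + 64)).2 lo (lo + 64)) n)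
          && !(PySem.Set.contains seen n))
        = (is_prime n && !(PySem.Set.contains seen n)) := by
      intro n h1 h2
      rw [hprimes, mark_window_char (ensure_primes st (lo + 64)).1 lo (lo + 64) n hlo hplim2 rfl hcover h1 h2]
    have hscan := unitScan_window seen
      (fun n => !(PySem.Set.contains (mark_window (ensure_primes st (lo + 64)).2 lo (lo + 64)) n)
          && !(PySem.Set.contains seen n))
      (lo + 64) (lo + 64 * ((f : Int) + 1)) lo (by omega)
      (by have : (0:Int) ≤ (f : Int) := Int.natCast_nonneg f; nlinarith)
      hgood
    simp only [window_search]
    cases hfind : (PySem.List.pyRange lo (lo + 64) 1).find?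
        (fun n => !(PySem.Set.contains (mark_window (ensure_primes st (lo + 64)).2 lo (lo + 64)) n)
          && !(PySem.Set.contains seen n)) with
    | some n =>
      rw [hfind] at hscan
      simp only at hscan
      constructor
      · rw [show ((f + 1 : Nat) : Int) = (f : Int) + 1 by push_cast; ring]
        exact hscan.symm
      · exact hInv'
    | none =>
      rw [hfind] at hscan
      simp only at hscan
      obtain ⟨ihval, ihinv⟩ := ih (lo + 64) (ensure_primes st (lo + 64)) (by omega) hInv'
      constructor
      · rw [show ((f + 1 : Nat) : Int) = (f : Int) + 1 by push_cast; ring, hscan, ihval]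
        congr 1
        ring
      · exact ihinv

theorem find_eq (p : Int) (st : Int × List Int) (seen : PySem.Set Int) (hInv : StInv st) :
    find_next_prime p seen = (next_unseen_prime p st seen).1 ∧
      StInv (next_unseen_prime p st seen).2 := by
  have hws := window_search_spec seen (pvSearchFuel seen) (max 2 (p + 1)) st (by omega) hInv
  rw [next_unseen_prime]
  refine ⟨?_, hws.2⟩
  rw [hws.1]
  simp only [find_next_prime]
  set c0 := max 2 (p + 1) with hc0
  have hc02 : 2 ≤ c0 := by omega
  by_cases hgt : c0 > 2
  · by_cases hev : c0 % 2 = 0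
    · rw [if_pos (by simp [PySem.Int.mod_eq_emod_of_pos]; omega)]
      rw [scan_eq _ seen (c0 + 1) (by omega) (by omega)]
      rw [unitScan_even_step c0 _ seen (by omega) hev]
    · rw [if_neg (by simp [PySem.Int.mod_eq_emod_of_pos]; omega)]
      rw [scan_eq _ seen c0 (by omega) (by omega)]
  · have : c0 = 2 := by omega
    rw [if_neg (by simp; omega)]
    rw [scan_eq _ seen c0 (by omega) (by omega)]

theorem inner_fold_eq (L : List Int) (st : Int × List Int) (seen : PySem.Set Int)
    (sizes : List Int) (p : Int) (hInv : StInv st) :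
    (L.foldl
      (fun (st3 : PySem.Set Int × List Int × Int) _ =>
        let prime := find_next_prime st3.2.2 st3.1
        (PySem.Set.add st3.1 prime, st3.2.1 ++ [prime], prime))
      (seen, sizes, p)
    = (let r := L.foldl
        (fun (q : ((Int × List Int) × PySem.Set Int × List Int) × Int) _ =>
          let pr := next_unseen_prime q.2 q.1.1 q.1.2.1
          ((pr.2, PySem.Set.add q.1.2.1 pr.1, q.1.2.2 ++ [pr.1]), pr.1))
        ((st, seen, sizes), p);
       (r.1.2.1, r.1.2.2, r.2)))
    ∧ StInv ((L.foldl
        (fun (q : ((Int × List Int) × PySem.Set Int × List Int) × Int) _ =>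
          let pr := next_unseen_prime q.2 q.1.1 q.1.2.1
          ((pr.2, PySem.Set.add q.1.2.1 pr.1, q.1.2.2 ++ [pr.1]), pr.1))
        ((st, seen, sizes), p)).1.1) := by
  induction L generalizing st seen sizes p with
  | nil => exact ⟨rfl, hInv⟩
  | cons x xs ih =>
    simp only [List.foldl_cons]
    obtain ⟨h1, h2⟩ := find_eq p st seen hInv
    rw [h1]
    exact ih _ _ _ _ h2

theorem bases_fold_eq (V : List Int) (h : Int) (st : Int × List Int) (seen : PySem.Set Int)
    (sizes : List Int) (hInv : StInv st) :
    (V.foldl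
      (fun (st2 : PySem.Set Int × List Int) base_vocab =>
        let r := (PySem.List.pyRange 0 h 1).foldl
          (fun (st3 : PySem.Set Int × List Int × Int) _ =>
            let prime := find_next_prime st3.2.2 st3.1
            (PySem.Set.add st3.1 prime, st3.2.1 ++ [prime], prime))
          (st2.1, st2.2, base_vocab - 1)
        (r.1, r.2.1))
      (seen, sizes)
    = (let r := V.foldl
        (fun (acc2 : (Int × List Int) × PySem.Set Int × List Int) base =>
          let r3 := (PySem.List.pyRange 0 h 1).foldl
            (fun (q : ((Int × List Int) × PySem.Set Int × List Int) × Int) _ =>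
              let pr := next_unseen_prime q.2 q.1.1 q.1.2.1
              ((pr.2, PySem.Set.add q.1.2.1 pr.1, q.1.2.2 ++ [pr.1]), pr.1))
            (acc2, base - 1)
          r3.1)
        (st, seen, sizes);
       (r.2.1, r.2.2)))
    ∧ StInv ((V.foldl
        (fun (acc2 : (Int × List Int) × PySem.Set Int × List Int) base =>
          let r3 := (PySem.List.pyRange 0 h 1).foldl
            (fun (q : ((Int × List Int) × PySem.Set Int × List Int) × Int) _ =>
              let pr := next_unseen_prime q.2 q.1.1 q.1.2.1
              ((pr.2, PySem.Set.add q.1.2.1 pr.1, q.1.2.2 ++ [pr.1]), pr.1))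
            (acc2, base - 1)
          r3.1)
        (st, seen, sizes)).1) := by
  induction V generalizing st seen sizes with
  | nil => exact ⟨rfl, hInv⟩
  | cons x xs ih =>
    simp only [List.foldl_cons]
    obtain ⟨h1, h2⟩ := inner_fold_eq (PySem.List.pyRange 0 h 1) st seen sizes (x - 1) hInv
    rw [h1]
    exact ih _ _ _ h2

theorem layers_fold_eq (Ls : List Int) (V : List Int) (h : Int) (st : Int × List Int)
    (seen : PySem.Set Int) (d : PySem.Dict Int (List Int)) (hInv : StInv st) :
    Ls.foldl
      (fun (acc : PySem.Set Int × PySem.Dict Int (List Int)) layer_id =>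
        let inner := V.foldl
          (fun (st2 : PySem.Set Int × List Int) base_vocab =>
            let r := (PySem.List.pyRange 0 h 1).foldl
              (fun (st3 : PySem.Set Int × List Int × Int) _ =>
                let prime := find_next_prime st3.2.2 st3.1
                (PySem.Set.add st3.1 prime, st3.2.1 ++ [prime], prime))
              (st2.1, st2.2, base_vocab - 1)
            (r.1, r.2.1))
          (acc.1, ([] : List Int))
        (inner.1, acc.2.insert layer_id inner.2))
      (seen, d)
    = (let r := Ls.foldl
        (fun (acc : (Int × List Int) × PySem.Set Int × PySem.Dict Int (List Int)) lid =>
          let r := V.foldl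
            (fun (acc2 : (Int × List Int) × PySem.Set Int × List Int) base =>
              let r3 := (PySem.List.pyRange 0 h 1).foldl
                (fun (q : ((Int × List Int) × PySem.Set Int × List Int) × Int) _ =>
                  let pr := next_unseen_prime q.2 q.1.1 q.1.2.1
                  ((pr.2, PySem.Set.add q.1.2.1 pr.1, q.1.2.2 ++ [pr.1]), pr.1))
                (acc2, base - 1)
              r3.1)
            (acc.1, acc.2.1, ([] : List Int))
          (r.1, r.2.1, acc.2.2.insert lid r.2.2))
        (st, seen, d);
       (r.2.1, r.2.2)) := by
  induction Ls generalizing st seen d with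
  | nil => rfl
  | cons x xs ih =>
    simp only [List.foldl_cons]
    obtain ⟨h1, h2⟩ := bases_fold_eq V h st seen [] hInv
    rw [h1]
    exact ih _ _ _ h2

theorem stinv_init : StInv ((2 : Int), ([] : List Int)) := by
  refine ⟨le_rfl, ?_⟩
  simp [primes_below, PySem.List.pyRange_one_eq_nil]

-- ===== VERDICT (by name: the statement is the Claim_ definition above) =====
theorem build_engram_head_vocab_sizes_spec : Claim_equal_build_engram_head_vocab_sizes := by
  intro vocab_sizes layer_ids heads_per_ngram _
  unfold Spec_build_engram_head_vocab_sizes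
  unfold build_engram_head_vocab_sizes build_engram_head_vocab_sizes_alt
  rw [layers_fold_eq layer_ids vocab_sizes heads_per_ngram ((2 : Int), ([] : List Int))
    ([] : PySem.Set Int) (PySem.Dict.empty : PySem.Dict Int (List Int)) stinv_init]
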